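-- pv_equiv track=rewrite | github.com/pbhuss/advent-of-code | solutions/aoc2023/11.py | get_expansion_map
-- ===== SOURCE A (Python) =====
-- def get_expansion_map(seen: set[int], multiplier: int) -> dict[int, int]:
--     result = {}
--     prev = 0
--     expansion = 0
--     for cur in sorted(seen):
--         expansion += (cur - prev) * (multiplier - 1)
--         result[cur] = expansion
--         prev = cur + 1
--     return result
-- ===== SOURCE B (Python) =====
-- def get_expansion_map(seen: set[int], multiplier: int) -> dict[int, int]:
--     order = sorted(seen)
--     return dict((c, (c - i) * (multiplier - 1)) for c, i in zip(order, range(len(order))))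
-- ===== Notes on version B (the rewrite author's own statement) =====
-- stated objective: simpler
-- what changed: Replaces A's running prev/expansion accumulator loop that inserts into a dict entry by entry with a stateless construction: zip the sorted coordinates with their ranks and build the dict at once from the closed-form value (c - rank)*(multiplier - 1), since the cumulative gaps below c telescope to c - rank.
import Mathlib
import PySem

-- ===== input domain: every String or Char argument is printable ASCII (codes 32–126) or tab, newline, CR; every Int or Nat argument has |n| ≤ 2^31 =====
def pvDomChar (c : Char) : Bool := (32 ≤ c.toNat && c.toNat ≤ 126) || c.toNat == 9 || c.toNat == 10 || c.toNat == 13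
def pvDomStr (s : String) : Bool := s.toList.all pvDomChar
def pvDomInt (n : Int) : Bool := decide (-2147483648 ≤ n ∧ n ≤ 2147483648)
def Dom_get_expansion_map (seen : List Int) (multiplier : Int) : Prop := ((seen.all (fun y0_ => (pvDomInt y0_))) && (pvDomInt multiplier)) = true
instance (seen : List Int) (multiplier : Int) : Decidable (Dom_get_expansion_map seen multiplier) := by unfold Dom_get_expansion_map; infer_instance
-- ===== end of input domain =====

-- B drops A's running prev/expansion accumulator: it zips sorted(seen) with ranks and
-- builds the dict at once from the closed form (c - rank)*(multiplier - 1) — simpler.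


-- ===== PORT A =====
def get_expansion_map (seen : List Int) (multiplier : Int) : List (Int × Int) :=
  (((PySem.List.sorted seen (fun x => x) false).foldl
      (fun (st : PySem.Dict Int Int × Int × Int) cur =>
        let expansion := st.2.2 + (cur - st.2.1) * (multiplier - 1)
        (st.1.insert cur expansion, cur + 1, expansion))
      (PySem.Dict.empty, 0, 0)).1).items

-- ===== PORT B =====
def get_expansion_map_alt (seen : List Int) (multiplier : Int) : List (Int × Int) :=
  let order := PySem.List.sorted seen (fun x => x) false
  (PySem.Dict.ofList
      ((order.zip (PySem.List.pyRange 0 (order.length : Int) 1)).map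
        (fun p => (p.1, (p.1 - p.2) * (multiplier - 1))))).items

-- ===== PRECONDITION & SPEC =====
def Spec_get_expansion_map (seen : List Int) (multiplier : Int) (out : List (Int × Int)) : Prop := out = get_expansion_map_alt seen multiplier
instance (seen : List Int) (multiplier : Int) (out : List (Int × Int)) : Decidable (Spec_get_expansion_map seen multiplier out) := by unfold Spec_get_expansion_map; infer_instance

-- ===== CLAIM (what is proved, stated in full; the proofs are below) =====
def Claim_equal_get_expansion_map : Prop := ∀ (seen : List Int) (multiplier : Int), Dom_get_expansion_map seen multiplier → Spec_get_expansion_map seen multiplier (get_expansion_map seen multiplier)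

-- ===== LEMMAS AND PROOFS =====

-- Loop invariant: starting with expansion = (prev - i)*(m-1), A's accumulator fold over l
-- builds the same dict as inserting the rank-indexed closed-form pairs of l (ranks from i).
theorem pv_fold_eq (m : Int) (l : List Int) :
    ∀ (d : PySem.Dict Int Int) (i prev exp : Int), exp = (prev - i) * (m - 1) →
      (l.foldl
        (fun (st : PySem.Dict Int Int × Int × Int) cur =>
          let expansion := st.2.2 + (cur - st.2.1) * (m - 1)
          (st.1.insert cur expansion, cur + 1, expansion))
        (d, prev, exp)).1
      = (l.zip (PySem.List.pyRange i (i + l.length) 1)).foldl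
          (fun (d : PySem.Dict Int Int) p => d.insert p.1 ((p.1 - p.2) * (m - 1))) d := by
  induction l with
  | nil => intro d i prev exp h; simp
  | cons c t ih =>
      intro d i prev exp h
      rw [PySem.List.pyRange_one_cons (by simp only [List.length_cons]; push_cast; omega)]
      simp only [List.zip_cons_cons, List.foldl_cons]
      have hv : exp + (c - prev) * (m - 1) = (c - i) * (m - 1) := by rw [h]; ring
      rw [show (exp + (c - prev) * (m - 1)) = (c - i) * (m - 1) from hv,
          show (i + ((c :: t).length : Int)) = (i + 1) + (t.length : Int) by simp only [List.length_cons]; push_cast; ring]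
      exact ih (d.insert c ((c - i) * (m - 1))) (i + 1) (c + 1) ((c - i) * (m - 1)) (by ring)

-- ===== VERDICT (by name: the statement is the Claim_ definition above) =====
theorem get_expansion_map_spec : Claim_equal_get_expansion_map := by
  intro seen m _
  unfold Spec_get_expansion_map get_expansion_map get_expansion_map_alt
  rw [pv_fold_eq m _ PySem.Dict.empty 0 0 0 (by ring)]
  simp [PySem.Dict.ofList, PySem.Dict.update, List.foldl_map]
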